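-- pv_equiv track=rewrite | github.com/parth-siprahub/Sipra_RMS | backend/app/utils/person_names.py | _title_token
-- ===== SOURCE A (Python) =====
-- def _title_single_word(word: str) -> str:
--     if not word:
--         return word
--     if len(word) == 1:
--         return word.upper()
--     return word[0].upper() + word[1:].lower()
--
-- def _title_token(token: str) -> str:
--     """Title-case one name token, including hyphenated and apostrophe forms."""
--     if not token:
--         return token
--     if "-" in token:
--         return "-".join(_title_token(part) for part in token.split("-"))
--     parts = token.split("'")
--     if len(parts) > 1:
--         return "'".join(_title_single_word(p) for p in parts)
--     return _title_single_word(token)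
-- ===== SOURCE B (Python) =====
-- # B: single left-to-right pass over the token; chunks between '-'/"'" delimiters
-- # are title-cased with _title_single_word and everything is concatenated back.
-- def _title_single_word(word: str) -> str:
--     if not word:
--         return word
--     if len(word) == 1:
--         return word.upper()
--     return word[0].upper() + word[1:].lower()
--
-- def _title_token(token: str) -> str:
--     out = []
--     chunk = []
--     for ch in token:
--         if ch in "-'":
--             out.append(_title_single_word("".join(chunk)))
--             out.append(ch)
--             chunk = []
--         else:
--             chunk.append(ch)
--     out.append(_title_single_word("".join(chunk)))
--     return "".join(out)
-- ===== Notes on version B (the rewrite author's own statement) =====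
-- stated objective: alternative
-- what changed: A's recursion (split on '-', recurse on each part, then branch on apostrophes) is replaced by one left-to-right pass that title-cases the chunk between any hyphen/apostrophe delimiter and concatenates chunks and delimiters back.
import Mathlib
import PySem

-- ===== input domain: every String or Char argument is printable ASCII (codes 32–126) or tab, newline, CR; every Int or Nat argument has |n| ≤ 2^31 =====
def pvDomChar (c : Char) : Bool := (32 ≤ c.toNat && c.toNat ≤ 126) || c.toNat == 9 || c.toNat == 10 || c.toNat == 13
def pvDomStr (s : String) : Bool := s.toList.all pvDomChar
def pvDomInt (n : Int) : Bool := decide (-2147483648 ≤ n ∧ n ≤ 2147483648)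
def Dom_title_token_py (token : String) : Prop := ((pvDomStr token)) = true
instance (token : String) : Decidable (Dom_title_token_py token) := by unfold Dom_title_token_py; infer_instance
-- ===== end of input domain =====

-- B replaces A's recursive hyphen/apostrophe handling by one left-to-right pass that
-- title-cases the chunks between '-'/'\'' delimiters (objective: alternative, same cost).

-- ===== PORT A =====
-- Reference model of Python's str.split(d) for a one-character separator, needed
-- below (by name) for the termination argument of the recursive port of A.
def splitCharPV (d : Char) : List Char → List (List Char)
  | [] => [[]]
  | c :: rest => if c = d then [] :: splitCharPV d rest else (splitCharPV d rest).modifyHead (c :: ·)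

theorem splitCharPV_exists_cons (d : Char) (t : List Char) :
    ∃ p ps, splitCharPV d t = p :: ps := by
  induction t with
  | nil => exact ⟨[], [], rfl⟩
  | cons c rest ih =>
    obtain ⟨p, ps, hp⟩ := ih
    by_cases h : c = d
    · exact ⟨[], splitCharPV d rest, by simp [splitCharPV, h]⟩
    · exact ⟨c :: p, ps, by simp [splitCharPV, h, hp]⟩

theorem length_le_of_mem_splitCharPV {d : Char} {t p : List Char}
    (hp : p ∈ splitCharPV d t) : p.length ≤ t.length := by
  induction t generalizing p with
  | nil => simp [splitCharPV] at hp; simp [hp]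
  | cons c rest ih =>
    by_cases h : c = d
    · simp [splitCharPV, h] at hp
      rcases hp with hp | hp
      · simp [hp]
      · exact (ih hp).trans (by simp)
    · obtain ⟨q, qs, hq⟩ := splitCharPV_exists_cons d rest
      simp [splitCharPV, h, hq] at hp
      rcases hp with hp | hp
      · have := ih (p := q) (by simp [hq])
        simp [hp]; omega
      · have := ih (p := p) (by simp [hq, hp])
        simp; omega

theorem length_lt_of_mem_splitCharPV {d : Char} {t p : List Char}
    (hd : d ∈ t) (hp : p ∈ splitCharPV d t) : p.length < t.length := by
  induction t generalizing p with
  | nil => simp at hd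
  | cons c rest ih =>
    by_cases h : c = d
    · simp [splitCharPV, h] at hp
      rcases hp with hp | hp
      · simp [hp]
      · have := length_le_of_mem_splitCharPV hp; simp; omega
    · have hd' : d ∈ rest := by
        rcases List.mem_cons.mp hd with h' | h'
        · exact absurd h'.symm h
        · exact h'
      obtain ⟨q, qs, hq⟩ := splitCharPV_exists_cons d rest
      simp [splitCharPV, h, hq] at hp
      rcases hp with hp | hp
      · have := ih hd' (p := q) (by simp [hq])
        simp [hp]; omega
      · have := ih hd' (p := p) (by simp [hq, hp])
        simp; omega

-- PySem's splitOn with a one-character separator is exactly splitCharPV.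
theorem splitOn_go_singletonPV (d : Char) :
    ∀ (t : List Char) (fuel : Nat) (cur : List Char) (acc : List (List Char)),
      t.length < fuel →
      PySem.Chars.splitOn.go [d] fuel t cur acc
        = acc.reverse ++ (splitCharPV d t).modifyHead (cur.reverse ++ ·) := by
  intro t
  induction t with
  | nil =>
    intro fuel cur acc hf
    match fuel with
    | 0 => omega
    | fuel + 1 => simp [PySem.Chars.splitOn.go, splitCharPV]
  | cons c rest ih =>
    intro fuel cur acc hf
    match fuel with
    | 0 => omega
    | fuel + 1 =>
      by_cases h : c = d
      · rw [PySem.Chars.splitOn.go]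
        have hpre : [d].isPrefixOf (c :: rest) = true := by simp [List.isPrefixOf, h]
        rw [if_pos hpre]
        simp only [List.length_singleton, List.drop_succ_cons, List.drop_zero]
        rw [ih fuel [] (cur.reverse :: acc) (by simpa using hf)]
        obtain ⟨q, qs, hq⟩ := splitCharPV_exists_cons d rest
        simp [splitCharPV, h, hq]
      · rw [PySem.Chars.splitOn.go]
        have hpre : [d].isPrefixOf (c :: rest) = false := by
          simp [List.isPrefixOf]; exact fun hdc => h hdc.symm
        rw [if_neg (by simp [hpre])]
        rw [ih fuel (c :: cur) acc (by simpa using hf)]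
        obtain ⟨q, qs, hq⟩ := splitCharPV_exists_cons d rest
        simp [splitCharPV, h, hq]

theorem splitOn_singletonPV (t : List Char) (d : Char) :
    PySem.Chars.splitOn t [d] = splitCharPV d t := by
  unfold PySem.Chars.splitOn
  rw [splitOn_go_singletonPV d t (t.length + 1) [] [] (by omega)]
  obtain ⟨q, qs, hq⟩ := splitCharPV_exists_cons d t
  simp [hq]

-- helper _title_single_word (identical source in A and in B; shared by both ports)
def title_single_word_chars (w : List Char) : List Char :=
  if w = [] then w
  else if w.length = 1 then PySem.Chars.upper w
  else (match PySem.Chars.pyGet? w 0 with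
        | some c => PySem.Chars.upper [c]
        | none => []) ++ PySem.Chars.lower (PySem.Chars.slice w (some 1) none)

-- _title_token, A's recursion (recursive calls on the parts of token.split("-"))
def title_token_chars (t : List Char) : List Char :=
  if t = [] then t
  else if h : PySem.Chars.isIn ['-'] t = true then
    PySem.Chars.join ['-'] ((PySem.Chars.splitOn t ['-']).attach.map (fun p => title_token_chars p.1))
  else
    let parts := PySem.Chars.splitOn t ['\'']
    if 1 < parts.length then PySem.Chars.join ['\''] (parts.map title_single_word_chars)
    else title_single_word_chars t
termination_by t.length
decreasing_by
  obtain ⟨p, hp⟩ := p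
  show p.length < t.length
  rw [splitOn_singletonPV] at hp
  exact length_lt_of_mem_splitCharPV
    ((List.singleton_infix_iff '-' t).mp ((PySem.Chars.isIn_iff_infix _ _).mp h)) hp

def title_token_py (token : String) : String :=
  String.ofList (title_token_chars token.toList)

-- ===== PORT B =====
-- one step of B's loop: flush the chunk at a delimiter, else extend the chunk
def titleTokenStepPV (st : List (List Char) × List Char) (ch : Char) :
    List (List Char) × List Char :=
  if ch ∈ ['-', '\''] then (st.1 ++ [title_single_word_chars st.2, [ch]], [])
  else (st.1, st.2 ++ [ch])

def title_token_alt_chars (t : List Char) : List Char :=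
  let st := t.foldl titleTokenStepPV ([], [])
  PySem.Chars.join [] (st.1 ++ [title_single_word_chars st.2])

def title_token_py_alt (token : String) : String :=
  String.ofList (title_token_alt_chars token.toList)

-- ===== PRECONDITION & SPEC =====
def Spec_title_token_py (token : String) (out : String) : Prop := out = title_token_py_alt token
instance (token : String) (out : String) : Decidable (Spec_title_token_py token out) := by unfold Spec_title_token_py; infer_instance

-- ===== CLAIM (what is proved, stated in full; the proofs are below) =====
def Claim_equal_title_token_py : Prop := ∀ (token : String), Dom_title_token_py token → Spec_title_token_py token (title_token_py token)

-- ===== LEMMAS AND PROOFS =====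
theorem splitCharPV_of_not_mem {d : Char} {t : List Char} (h : d ∉ t) :
    splitCharPV d t = [t] := by
  induction t with
  | nil => rfl
  | cons c rest ih =>
    have hcd : ¬ c = d := fun hc => h (by simp [hc])
    simp [splitCharPV, hcd, ih (fun hr => h (by simp [hr]))]

theorem splitCharPV_length (d : Char) (t : List Char) :
    (splitCharPV d t).length = t.count d + 1 := by
  induction t with
  | nil => simp [splitCharPV]
  | cons c rest ih =>
    by_cases h : c = d
    · simp [splitCharPV, h, ih]
    · obtain ⟨q, qs, hq⟩ := splitCharPV_exists_cons d rest
      simp [splitCharPV, h, hq]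
      simpa [hq] using ih

theorem splitCharPV_append_of_not_mem {d : Char} {pre : List Char} (l : List Char)
    (h : d ∉ pre) :
    splitCharPV d (pre ++ l) = (splitCharPV d l).modifyHead (pre ++ ·) := by
  induction pre with
  | nil =>
    obtain ⟨q, qs, hq⟩ := splitCharPV_exists_cons d l
    simp [hq]
  | cons c pc ih =>
    have hcd : ¬ c = d := fun hc => h (by simp [hc])
    obtain ⟨q, qs, hq⟩ := splitCharPV_exists_cons d l
    have := ih (fun hr => h (by simp [hr]))
    simp [splitCharPV, hcd, this, hq]

theorem not_mem_of_mem_splitCharPV {d : Char} {t p : List Char}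
    (hp : p ∈ splitCharPV d t) : d ∉ p := by
  induction t generalizing p with
  | nil => simp [splitCharPV] at hp; simp [hp]
  | cons c rest ih =>
    by_cases h : c = d
    · simp [splitCharPV, h] at hp
      rcases hp with hp | hp
      · simp [hp]
      · exact ih hp
    · obtain ⟨q, qs, hq⟩ := splitCharPV_exists_cons d rest
      simp [splitCharPV, h, hq] at hp
      rcases hp with hp | hp
      · have := ih (p := q) (by simp [hq])
        simp [hp]
        exact ⟨fun hdc => absurd hdc.symm h, this⟩
      · exact ih (p := p) (by simp [hq, hp])

theorem join_nil_flattenPV (l : List (List Char)) :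
    PySem.Chars.join [] l = l.flatten := by
  induction l with
  | nil => rfl
  | cons x xs ih =>
    cases xs with
    | nil => simp [PySem.Chars.join_singleton]
    | cons y ys => simp [PySem.Chars.join_cons_cons, ih]

theorem tw_nil : title_single_word_chars [] = [] := rfl

-- the common normal form both programs compute
def a1PV (p : List Char) : List Char :=
  PySem.Chars.join ['\''] ((splitCharPV '\'' p).map title_single_word_chars)

def fPV (t : List Char) : List Char :=
  PySem.Chars.join ['-'] ((splitCharPV '-' t).map a1PV)

theorem a1PV_of_not_mem {p : List Char} (h : '\'' ∉ p) :
    a1PV p = title_single_word_chars p := by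
  simp [a1PV, splitCharPV_of_not_mem h, PySem.Chars.join_singleton]

theorem fPV_of_not_mem {t : List Char} (h : '-' ∉ t) : fPV t = a1PV t := by
  simp [fPV, splitCharPV_of_not_mem h, PySem.Chars.join_singleton]

-- A on a hyphen-free token is a1PV
theorem A_noHyphen {p : List Char} (h : '-' ∉ p) :
    title_token_chars p = a1PV p := by
  rcases List.eq_nil_or_concat p with rfl | _
  · simp [title_token_chars.eq_def, a1PV, splitCharPV, PySem.Chars.join_singleton, tw_nil]
  · have hne : p ≠ [] := by rintro rfl; simp_all
    have hin : ¬ PySem.Chars.isIn ['-'] p = true := by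
      rw [PySem.Chars.isIn_iff_infix, List.singleton_infix_iff]; exact h
    rw [title_token_chars.eq_def]
    rw [if_neg hne, dif_neg hin]
    simp only [splitOn_singletonPV]
    by_cases hl : 1 < (splitCharPV '\'' p).length
    · simp [hl, a1PV]
    · have hcnt := splitCharPV_length '\'' p
      have h0 : p.count '\'' = 0 := by omega
      have h' : '\'' ∉ p := by
        simpa using (List.count_eq_zero.mp h0)
      simp [hl, a1PV_of_not_mem h']

-- A computes fPV
theorem A_eq_F (t : List Char) : title_token_chars t = fPV t := by
  by_cases hd : '-' ∈ t
  · have hne : t ≠ [] := by rintro rfl; simp at hd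
    have hin : PySem.Chars.isIn ['-'] t = true := by
      rw [PySem.Chars.isIn_iff_infix, List.singleton_infix_iff]; exact hd
    rw [title_token_chars.eq_def, if_neg hne, dif_pos hin]
    rw [List.attach_map_val, splitOn_singletonPV, fPV]
    congr 1
    exact List.map_congr_left (fun p hp => A_noHyphen (not_mem_of_mem_splitCharPV hp))
  · rw [fPV_of_not_mem hd]; exact A_noHyphen hd

-- B's loop, written as a recursion (chunk = the pending characters)
def bRunPV : List Char → List Char → List Char
  | chunk, [] => title_single_word_chars chunk
  | chunk, c :: rest =>
    if c ∈ ['-', '\''] then title_single_word_chars chunk ++ c :: bRunPV [] rest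
    else bRunPV (chunk ++ [c]) rest

theorem foldB (t : List Char) :
    ∀ (out : List (List Char)) (chunk : List Char),
      PySem.Chars.join []
          ((t.foldl titleTokenStepPV (out, chunk)).1
            ++ [title_single_word_chars (t.foldl titleTokenStepPV (out, chunk)).2])
        = out.flatten ++ bRunPV chunk t := by
  induction t with
  | nil => intro out chunk; simp [bRunPV, join_nil_flattenPV]
  | cons c rest ih =>
    intro out chunk
    by_cases h : c ∈ ['-', '\'']
    · simp only [List.foldl_cons, titleTokenStepPV, if_pos h]
      rw [ih]
      simp [bRunPV, h]
    · simp only [List.foldl_cons, titleTokenStepPV, if_neg h]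
      rw [ih]
      simp [bRunPV, h]

-- B's recursion computes fPV of (chunk ++ rest) for a delimiter-free chunk
theorem bRun_eq_F (t : List Char) :
    ∀ chunk : List Char, '-' ∉ chunk → '\'' ∉ chunk →
      bRunPV chunk t = fPV (chunk ++ t) := by
  induction t with
  | nil =>
    intro chunk h1 h2
    simp [bRunPV, fPV_of_not_mem (by simpa using h1), a1PV_of_not_mem (by simpa using h2)]
  | cons c rest ih =>
    intro chunk h1 h2
    by_cases h : c ∈ ['-', '\'']
    · rcases List.mem_pair.mp (by simpa using h) with rfl | rfl
      · -- c = '-'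
        rw [bRunPV, if_pos h, ih [] (by simp) (by simp)]
        simp only [List.nil_append]
        obtain ⟨q, qs, hq⟩ := splitCharPV_exists_cons '-' rest
        have hch : splitCharPV '-' (chunk ++ '-' :: rest) = chunk :: q :: qs := by
          rw [splitCharPV_append_of_not_mem _ h1]; simp [splitCharPV, hq]
        conv_rhs => rw [fPV, hch]
        simp only [List.map_cons, PySem.Chars.join_cons_cons]
        rw [a1PV_of_not_mem (by simpa using h2), fPV, hq]
        simp
      · -- c = '\''
        rw [bRunPV, if_pos h, ih [] (by simp) (by simp)]
        simp only [List.nil_append]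
        obtain ⟨q, qs, hq⟩ := splitCharPV_exists_cons '-' rest
        have hch : splitCharPV '-' (chunk ++ '\'' :: rest)
            = (chunk ++ '\'' :: q) :: qs := by
          rw [splitCharPV_append_of_not_mem _ h1]
          have : splitCharPV '-' ('\'' :: rest) = ('\'' :: q) :: qs := by
            simp [splitCharPV, hq]
          rw [this]; rfl
        conv_rhs => rw [fPV, hch]
        have ha1 : a1PV (chunk ++ '\'' :: q) = title_single_word_chars chunk ++ '\'' :: a1PV q := by
          rw [a1PV, splitCharPV_append_of_not_mem _ h2]
          obtain ⟨r, rs, hr⟩ := splitCharPV_exists_cons '\'' q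
          have : splitCharPV '\'' ('\'' :: q) = [] :: r :: rs := by
            simp [splitCharPV, hr]
          rw [this]
          simp only [List.modifyHead_cons, List.append_nil, List.map_cons,
            PySem.Chars.join_cons_cons]
          rw [a1PV, hr]
          simp
        rw [fPV, hq]
        cases qs with
        | nil =>
          simp [PySem.Chars.join_singleton, ha1]
        | cons s ss =>
          simp [PySem.Chars.join_cons_cons, ha1]
    · rw [bRunPV, if_neg h]
      have hc1 : c ≠ '-' := fun hc => h (by simp [hc])
      have hc2 : c ≠ '\'' := fun hc => h (by simp [hc])
      rw [ih (chunk ++ [c]) (by simp [h1, Ne.symm hc1]) (by simp [h2, Ne.symm hc2])]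
      simp

theorem alt_eq_F (t : List Char) : title_token_alt_chars t = fPV t := by
  rw [title_token_alt_chars]
  have := foldB t [] []
  simp only [List.flatten_nil, List.nil_append] at this
  rw [this]
  simpa using bRun_eq_F t [] (by simp) (by simp)

-- ===== VERDICT (by name: the statement is the Claim_ definition above) =====
theorem title_token_py_spec : Claim_equal_title_token_py := by
  intro token _
  unfold Spec_title_token_py title_token_py title_token_py_alt
  rw [A_eq_F, alt_eq_F]
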